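-- pv_equiv track=rewrite | github.com/liuliangcan/play_with_python | before20221227/cf/cf11372c.py | solve
-- ===== SOURCE A (Python) =====
-- def solve(n, a):
--     correct = 0
--     incorrect = -1  # 上个错误位置
--     incorrect_steady = True  # 错误位置是否连续
--     for i, c in enumerate(a):
--         if i + 1 == c:
--             correct += 1
--         else:
--             if incorrect != -1:
--                 if incorrect_steady and i != incorrect + 1:  # 不连续
--                     incorrect_steady = False
--             incorrect = i
--
--     if correct == n:  # 全都在正确位置，不许操作
--         return 0
--     if incorrect_steady:  # 错误位置连续，直接重排这个连续子段，1次操作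
--         return 1
--     return 2  # 错误位置不连续，无法一次搞定；直接错排整个数组，然后再有序，共需2次
-- ===== SOURCE B (Python) =====
-- def solve(n, a):
--     L = len(a)
--     i = 0
--     while i < L and a[i] == i + 1:
--         i += 1
--     j = L
--     while j > i and a[j - 1] == j:
--         j -= 1
--     mid_fixed = 0
--     for k in range(i, j):
--         if a[k] == k + 1:
--             mid_fixed += 1
--     if i + (L - j) + mid_fixed == n:
--         return 0
--     if mid_fixed == 0:
--         return 1
--     return 2
-- ===== Notes on version B (the rewrite author's own statement) =====
-- stated objective: alternative
-- what changed: Replaces A's single streaming pass with a (correct, last-bad-index, steady) state machine by a two-pointer scheme: trim the maximal fixed prefix and fixed suffix from both ends, then count the fixed points left in the middle window; 0 iff the three-part fixed total equals n, 1 iff the middle window has no fixed point (bad positions contiguous), else 2.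
import Mathlib
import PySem

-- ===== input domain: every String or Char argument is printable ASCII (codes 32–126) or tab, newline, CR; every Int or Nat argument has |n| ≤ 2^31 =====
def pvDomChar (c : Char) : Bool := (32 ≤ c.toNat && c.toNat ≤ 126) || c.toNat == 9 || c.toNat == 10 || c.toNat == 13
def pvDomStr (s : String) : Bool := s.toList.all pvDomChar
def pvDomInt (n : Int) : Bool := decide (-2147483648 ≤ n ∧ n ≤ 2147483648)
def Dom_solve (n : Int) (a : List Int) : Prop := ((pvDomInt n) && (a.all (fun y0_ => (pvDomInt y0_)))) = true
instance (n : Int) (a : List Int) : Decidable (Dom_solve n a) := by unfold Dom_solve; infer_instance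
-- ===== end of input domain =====

-- B replaces A's single streaming pass with a (correct, last-bad, steady) state machine by a
-- two-pointer scheme: trim the maximal fixed prefix and suffix, then count the fixed points
-- left in the middle window; objective: alternative (same O(n) cost).

-- ===== PORT A =====
-- state = (correct, incorrect, incorrect_steady), folded over enumerate(a)
def solveStep (s : Int × Int × Bool) (p : Int × Int) : Int × Int × Bool :=
  if p.1 + 1 = p.2 then (s.1 + 1, s.2.1, s.2.2)
  else
    let steady :=
      if s.2.1 ≠ -1 then
        (if s.2.2 = true ∧ p.1 ≠ s.2.1 + 1 then false else s.2.2)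
      else s.2.2
    (s.1, p.1, steady)

def solve (n : Int) (a : List Int) : Int :=
  let st := (PySem.List.enumerate a 0).foldl solveStep (0, -1, true)
  if st.1 = n then 0
  else if st.2.2 = true then 1
  else 2

-- ===== PORT B =====
-- `while i < L and a[i] == i + 1: i += 1` (i starts at the given index; a[i] is in range
-- whenever the guard holds, so pyGetD with a dummy default is exact there)
def trimL (a : List Int) (i : Nat) : Nat :=
  if h : i < a.length ∧ PySem.List.pyGetD a (i : Int) 0 = (i : Int) + 1 then trimL a (i + 1)
  else i
termination_by a.length - i
decreasing_by omega

-- `while j > i and a[j - 1] == j: j -= 1`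
def trimR (a : List Int) (i j : Nat) : Nat :=
  if h : i < j ∧ PySem.List.pyGetD a ((j : Int) - 1) 0 = (j : Int) then trimR a i (j - 1)
  else j
termination_by j
decreasing_by omega

def solve_alt (n : Int) (a : List Int) : Int :=
  let L := a.length
  let i := trimL a 0
  let j := trimR a i L
  let mid := (PySem.List.pyRange (i : Int) (j : Int) 1).foldl
    (fun s k => if PySem.List.pyGetD a k 0 = k + 1 then s + 1 else s) (0 : Int)
  if (i : Int) + ((L : Int) - (j : Int)) + mid = n then 0
  else if mid = 0 then 1
  else 2

-- ===== PRECONDITION & SPEC =====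
def Spec_solve (n : Int) (a : List Int) (out : Int) : Prop := out = solve_alt n a
instance (n : Int) (a : List Int) (out : Int) : Decidable (Spec_solve n a out) := by unfold Spec_solve; infer_instance

-- ===== CLAIM (what is proved, stated in full; the proofs are below) =====
def Claim_equal_solve : Prop := ∀ (n : Int) (a : List Int), Dom_solve n a → Spec_solve n a (solve n a)

-- ===== LEMMAS AND PROOFS =====

-- the list of mismatched indices of l, where the first element of l has index k
def badF (k : Int) : List Int → List Int
  | [] => []
  | c :: t => if k + 1 = c then badF (k + 1) t else k :: badF (k + 1) t

lemma badF_cons (k c : Int) (t : List Int) :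
    badF k (c :: t) = if k + 1 = c then badF (k + 1) t else k :: badF (k + 1) t := rfl

-- successive elements differ by exactly 1 (what A's `incorrect_steady` flag tracks)
def chain : List Int → Bool
  | [] => true
  | [_] => true
  | x :: y :: t => (decide (y = x + 1)) && chain (y :: t)

lemma chain_cons_cons (x y : Int) (t : List Int) :
    chain (x :: y :: t) = ((decide (y = x + 1)) && chain (y :: t)) := rfl

lemma lastD_irrel {α : Type} (y : α) (t : List α) (d d' : α) :
    (y :: t).getLastD d = (y :: t).getLastD d' := by
  cases t with
  | nil => rfl
  | cons z t => simp only [List.getLastD_cons]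

lemma getLastD_mem {α : Type} (x : α) (t : List α) (d : α) : (x :: t).getLastD d ∈ x :: t := by
  induction t generalizing x d with
  | nil => simp
  | cons y t ih =>
    rw [List.getLastD_cons]
    exact List.mem_cons_of_mem _ (ih y x)

lemma chain_snoc : ∀ (B : List Int) (k : Int), B ≠ [] →
    chain (B ++ [k]) = (chain B && decide (k = B.getLastD 0 + 1))
  | [], _, h => absurd rfl h
  | [x], k, _ => by simp [chain]
  | x :: y :: t, k, _ => by
    have ih := chain_snoc (y :: t) k (by simp)
    simp only [List.cons_append] at *
    rw [chain_cons_cons x y (t ++ [k]), ih, chain_cons_cons x y t]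
    simp only [List.getLastD_cons]
    rw [Bool.and_assoc]

lemma steady_step (B : List Int) (k : Int) (hB : ∀ x ∈ B, 0 ≤ x) :
    (if B.getLastD (-1) ≠ -1 then
       (if chain B = true ∧ k ≠ B.getLastD (-1) + 1 then false else chain B)
     else chain B) = chain (B ++ [k]) := by
  cases B with
  | nil => simp [chain]
  | cons x B' =>
    have hinc : (0:Int) ≤ (x :: B').getLastD (-1) := hB _ (getLastD_mem x B' (-1))
    have hne : (x :: B').getLastD (-1) ≠ -1 := by omega
    rw [chain_snoc (x :: B') k (by simp), lastD_irrel x B' 0 (-1)]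
    simp only [hne, ne_eq]
    by_cases hc : chain (x :: B') = true
    · by_cases hk : k = (x :: B').getLastD (-1) + 1 <;> simp [hc, hk]
    · simp only [Bool.not_eq_true] at hc
      simp [hc]

lemma badF_mem : ∀ (l : List Int) (k x : Int), x ∈ badF k l → k ≤ x ∧ x < k + l.length
  | [], k, x => by simp [badF]
  | c :: t, k, x => by
    intro hx
    rw [badF_cons] at hx
    split at hx
    · have := badF_mem t (k + 1) x hx
      simp only [List.length_cons]
      push_cast
      omega
    · simp only [List.length_cons]
      rcases List.mem_cons.1 hx with h | h
      · push_cast; omega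
      · have := badF_mem t (k + 1) x h
        push_cast; omega

lemma badF_isChain : ∀ (l : List Int) (k : Int), List.IsChain (· < ·) (badF k l)
  | [], k => by simp [badF]
  | c :: t, k => by
    rw [badF_cons]
    split
    · exact badF_isChain t (k + 1)
    · refine List.isChain_cons.2 ⟨?_, badF_isChain t (k + 1)⟩
      intro b hb
      have := badF_mem t (k + 1) b (List.mem_of_mem_head? hb)
      omega

lemma getLastD_append_singleton (B : List Int) (k d : Int) :
    (B ++ [k]).getLastD d = k := by
  induction B generalizing d with
  | nil => rfl
  | cons x B ih => rw [List.cons_append, List.getLastD_cons]; exact ih x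

lemma loop_inv : ∀ (l : List Int) (k c0 : Int) (B : List Int), 0 ≤ k →
    (∀ x ∈ B, 0 ≤ x ∧ x < k) →
    (PySem.List.enumerate l k).foldl solveStep (c0, B.getLastD (-1), chain B)
      = (c0 + ((l.length : Int) - ((badF k l).length : Int)),
         (B ++ badF k l).getLastD (-1), chain (B ++ badF k l))
  | [], k, c0, B, hk, hB => by simp [badF]
  | c :: t, k, c0, B, hk, hB => by
    rw [PySem.List.enumerate_cons, List.foldl_cons]
    by_cases h : k + 1 = c
    · rw [show solveStep (c0, B.getLastD (-1), chain B) (k, c)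
            = (c0 + 1, B.getLastD (-1), chain B) by simp [solveStep, h]]
      rw [loop_inv t (k + 1) (c0 + 1) B (by omega) (fun x hx => by have := hB x hx; omega)]
      rw [badF_cons, if_pos h]
      simp only [List.length_cons, Prod.mk.injEq, and_true]
      push_cast; ring
    · rw [show solveStep (c0, B.getLastD (-1), chain B) (k, c)
            = (c0, k,
               if B.getLastD (-1) ≠ -1 then
                 (if chain B = true ∧ k ≠ B.getLastD (-1) + 1 then false else chain B)
               else chain B) by simp [solveStep, h]]
      rw [steady_step B k (fun x hx => (hB x hx).1)]
      have hrec := loop_inv t (k + 1) c0 (B ++ [k]) (by omega)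
        (fun x hx => by
          rcases List.mem_append.1 hx with h' | h'
          · have := hB x h'; omega
          · simp only [List.mem_singleton] at h'; omega)
      rw [getLastD_append_singleton B k (-1)] at hrec
      rw [hrec, badF_cons, if_neg h]
      simp only [List.length_cons, List.append_assoc, List.singleton_append, Prod.mk.injEq,
        and_true]
      push_cast; ring

lemma chain_getLast : ∀ (x : Int) (t : List Int), chain (x :: t) = true →
    (x :: t).getLastD 0 = x + t.length
  | x, [], _ => by simp
  | x, y :: t, h => by
    rw [chain_cons_cons] at h
    simp only [Bool.and_eq_true, decide_eq_true_eq] at h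
    rw [List.getLastD_cons, lastD_irrel y t x 0, chain_getLast y t h.2]
    simp only [List.length_cons]
    push_cast
    omega

lemma isChain_getLast_ge : ∀ (x : Int) (t : List Int), List.IsChain (· < ·) (x :: t) →
    x + (t.length : Int) ≤ (x :: t).getLastD 0
  | x, [], _ => by simp
  | x, y :: t, h => by
    rw [List.isChain_cons_cons] at h
    have := isChain_getLast_ge y t h.2
    rw [List.getLastD_cons, lastD_irrel y t x 0]
    simp only [List.length_cons] at *
    push_cast at *
    omega

lemma getLast_chain : ∀ (x : Int) (t : List Int), List.IsChain (· < ·) (x :: t) →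
    (x :: t).getLastD 0 = x + t.length → chain (x :: t) = true
  | x, [], _, _ => by simp [chain]
  | x, y :: t, h, hl => by
    rw [List.isChain_cons_cons] at h
    have hge := isChain_getLast_ge y t h.2
    rw [List.getLastD_cons, lastD_irrel y t x 0] at hl
    have hy : y = x + 1 := by
      simp only [List.length_cons] at hl
      push_cast at hl
      omega
    have hl' : (y :: t).getLastD 0 = y + t.length := by
      simp only [List.length_cons] at hl
      push_cast at hl ⊢
      omega
    have hrec := getLast_chain y t h.2 hl'
    rw [chain_cons_cons, hrec]
    simp [hy]

-- ===== bridge: badF as a filter of nat indices =====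

-- the fixed-point test at nat index m
def fixB (a : List Int) (m : Nat) : Bool := decide (a.getD m 0 = (m : Int) + 1)

-- nat indices of the mismatched positions
def badN (a : List Int) : List Nat := (List.range a.length).filter (fun m => !fixB a m)

lemma badF_eq_filter : ∀ (l : List Int) (s : Nat),
    badF (s : Int) l
      = (((List.range l.length).filter
            (fun m => !decide (l.getD m 0 = (s : Int) + (m : Int) + 1))).map
          (fun m => ((s + m : Nat) : Int)))
  | [], s => by simp [badF]
  | c :: t, s => by
    have ih := badF_eq_filter t (s + 1)
    rw [badF_cons, List.length_cons, List.range_succ_eq_map, List.filter_cons, List.filter_map,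
      apply_ite (List.map (fun m => ((s + m : Nat) : Int)))]
    simp only [List.map_cons, List.map_map]
    have hpred : ((fun m => !decide ((c :: t).getD m 0 = (s : Int) + (m : Int) + 1)) ∘ Nat.succ)
        = fun m => !decide (t.getD m 0 = ((s + 1 : Nat) : Int) + (m : Int) + 1) := by
      funext m
      simp only [Function.comp_apply, List.getD_cons_succ]
      rw [show (s : Int) + ((m.succ : Nat) : Int) + 1 = ((s + 1 : Nat) : Int) + (m : Int) + 1 by
        push_cast; ring]
    have hmap : ((fun m => ((s + m : Nat) : Int)) ∘ Nat.succ)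
        = fun m => (((s + 1) + m : Nat) : Int) := by
      funext m
      simp only [Function.comp_apply]
      push_cast
      ring
    rw [hpred, hmap, ← ih]
    by_cases hc : (s : Int) + 1 = c
    · rw [if_pos hc, if_neg (by simp; omega)]
      norm_cast
    · rw [if_neg hc, if_pos (by simp; omega)]
      norm_cast

lemma mem_badN (a : List Int) (m : Nat) : m ∈ badN a ↔ m < a.length ∧ fixB a m = false := by
  simp [badN, List.mem_filter, List.mem_range]

lemma pairwise_badN (a : List Int) : (badN a).Pairwise (· < ·) :=
  List.Pairwise.sublist List.filter_sublist List.pairwise_lt_range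

lemma badF_zero (a : List Int) : badF 0 a = (badN a).map (fun m : Nat => (m : Int)) := by
  rw [show (0 : Int) = ((0 : Nat) : Int) by norm_num, badF_eq_filter a 0]
  unfold badN fixB
  simp

lemma getLastD_max : ∀ (x : Nat) (t : List Nat) (d : Nat), (x :: t).Pairwise (· < ·) →
    ∀ m ∈ x :: t, m ≤ (x :: t).getLastD d
  | x, [], d, _, m, hm => by
    simp only [List.mem_singleton] at hm
    simp [hm]
  | x, y :: t, d, hp, m, hm => by
    rw [List.pairwise_cons] at hp
    rw [List.getLastD_cons, lastD_irrel y t x d]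
    rcases List.mem_cons.1 hm with h | h
    · subst h
      have h1 := getLastD_max y t d hp.2 y List.mem_cons_self
      have h2 := hp.1 y List.mem_cons_self
      omega
    · exact getLastD_max y t d hp.2 m h

lemma getLastD_map_cast : ∀ (x : Nat) (l : List Nat),
    ((x :: l).map (fun m : Nat => (m : Int))).getLastD 0 = (((x :: l).getLastD 0 : Nat) : Int)
  | x, [] => by simp
  | x, y :: l => by
    rw [List.map_cons, List.map_cons, List.getLastD_cons,
      lastD_irrel ((y : Int)) (l.map (fun m : Nat => (m : Int))) ((x : Int)) 0]
    rw [show ((x :: y :: l).getLastD 0) = ((y :: l).getLastD 0) by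
      rw [List.getLastD_cons, lastD_irrel y l x 0]]
    have h := getLastD_map_cast y l
    rw [List.map_cons] at h
    exact h

lemma trimL_spec (a : List Int) (i : Nat) (h : i ≤ a.length) :
    i ≤ trimL a i ∧ trimL a i ≤ a.length ∧
      (∀ m, i ≤ m → m < trimL a i → fixB a m = true) ∧
      (trimL a i < a.length → fixB a (trimL a i) = false) := by
  rw [trimL]
  split
  next hcond =>
    have ih := trimL_spec a (i + 1) (by omega)
    refine ⟨by omega, ih.2.1, ?_, ih.2.2.2⟩
    intro m h1 h2
    by_cases hm : m = i
    · subst hm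
      unfold fixB
      rw [PySem.List.pyGetD_natCast] at hcond
      exact decide_eq_true hcond.2
    · exact ih.2.2.1 m (by omega) h2
  next hcond =>
    rw [Classical.not_and_iff_not_or_not] at hcond
    refine ⟨le_refl _, h, by intro m h1 h2; omega, ?_⟩
    intro hlt
    unfold fixB
    rcases hcond with h' | h'
    · omega
    · rw [PySem.List.pyGetD_natCast] at h'
      exact decide_eq_false h'
termination_by a.length - i
decreasing_by omega

lemma trimR_spec (a : List Int) (i j : Nat) (hij : i ≤ j) (hj : j ≤ a.length) :
    i ≤ trimR a i j ∧ trimR a i j ≤ j ∧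
      (∀ m, trimR a i j ≤ m → m < j → fixB a m = true) ∧
      (i < trimR a i j → fixB a (trimR a i j - 1) = false) := by
  rw [trimR]
  split
  next hcond =>
    have hj1 : ((j : Int) - 1) = ((j - 1 : Nat) : Int) := by omega
    have ih := trimR_spec a i (j - 1) (by omega) (by omega)
    refine ⟨ih.1, by omega, ?_, ih.2.2.2⟩
    intro m h1 h2
    by_cases hm : m = j - 1
    · subst hm
      unfold fixB
      rw [hj1, PySem.List.pyGetD_natCast] at hcond
      have : a.getD (j - 1) 0 = ((j - 1 : Nat) : Int) + 1 := by
        rw [hcond.2]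
        omega
      exact decide_eq_true this
    · exact ih.2.2.1 m h1 (by omega)
  next hcond =>
    rw [Classical.not_and_iff_not_or_not] at hcond
    refine ⟨hij, le_refl _, by intro m h1 h2; omega, ?_⟩
    intro hlt
    unfold fixB
    rcases hcond with h' | h'
    · omega
    · have hj1 : ((j : Int) - 1) = ((j - 1 : Nat) : Int) := by omega
      rw [hj1, PySem.List.pyGetD_natCast] at h'
      have : ¬ a.getD (j - 1) 0 = ((j - 1 : Nat) : Int) + 1 := by
        intro hEq
        apply h'
        rw [hEq]
        omega
      exact decide_eq_false this
termination_by j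
decreasing_by omega

-- B's middle loop counts the fixed points of the window [i, j)
lemma mid_eq_countP (a : List Int) (i j : Nat) (hij : i ≤ j) :
    (PySem.List.pyRange (i : Int) (j : Int) 1).foldl
        (fun s k => if PySem.List.pyGetD a k 0 = k + 1 then s + 1 else s) (0 : Int)
      = ((List.range' i (j - i)).countP (fixB a) : Int) := by
  rw [PySem.List.foldl_ite_add_one, PySem.List.pyRange_one]
  rw [show ((j : Int) - (i : Int)).toNat = j - i by omega]
  rw [List.countP_map, List.range'_eq_map_range, List.countP_map]
  rw [zero_add]
  congr 1
  apply List.countP_congr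
  intro m _
  simp only [Function.comp_apply]
  rw [show (i : Int) + (m : Int) = ((i + m : Nat) : Int) by push_cast; ring,
    PySem.List.pyGetD_natCast]
  unfold fixB
  rfl

lemma countP_not_fix_eq_zero (a : List Int) (s n : Nat)
    (h : ∀ m, s ≤ m → m < s + n → fixB a m = true) :
    (List.range' s n).countP (fun m => !fixB a m) = 0 := by
  rw [List.countP_eq_zero]
  intro m hm
  rw [List.mem_range'_1] at hm
  rw [h m hm.1 hm.2]
  simp

lemma countP_add_countP_not (l : List Nat) (p : Nat → Bool) :
    l.countP p + l.countP (fun m => !p m) = l.length := by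
  rw [List.length_eq_countP_add_countP p]
  congr 1
  apply List.countP_congr
  intro m _
  simp

-- ===== VERDICT (by name: the statement is the Claim_ definition above) =====
theorem solve_spec : Claim_equal_solve := by
  intro n a _
  unfold Spec_solve solve solve_alt
  dsimp only
  -- A's loop state
  have hA := loop_inv a 0 0 [] (by omega) (by simp)
  simp only [List.getLastD_nil, List.nil_append] at hA
  rw [show chain [] = true from rfl] at hA
  rw [hA, badF_zero a]
  simp only [zero_add]
  -- B's pointers
  have hL := trimL_spec a 0 (by omega)
  set L := a.length with hLdef
  set i := trimL a 0 with hidef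
  have hR := trimR_spec a i L hL.2.1 (le_refl _)
  set j := trimR a i L with hjdef
  have hij : i ≤ j := hR.1
  have hjL : j ≤ L := hR.2.1
  rw [mid_eq_countP a i j hij]
  -- counting: |badN| is the bad count of the middle window
  have hsplit : List.range L = List.range' 0 i ++ (List.range' i (j - i) ++ List.range' j (L - j)) := by
    have h1 : List.range' i (j - i) ++ List.range' j (L - j) = List.range' i (j - i + (L - j)) := by
      rw [show List.range' j (L - j) = List.range' (i + (j - i)) (L - j) by rw [show i + (j - i) = j by omega]]
      exact List.range'_append_1
    have h2 : List.range' 0 i ++ List.range' i (j - i + (L - j)) = List.range' 0 (i + (j - i + (L - j))) := by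
      rw [show List.range' i (j - i + (L - j)) = List.range' (0 + i) (j - i + (L - j)) by rw [Nat.zero_add]]
      exact List.range'_append_1
    rw [h1, h2, show i + (j - i + (L - j)) = L by omega, List.range_eq_range']
  have hcnt : (badN a).length = (List.range' i (j - i)).countP (fun m => !fixB a m) := by
    rw [badN, ← List.countP_eq_length_filter, ← hLdef, hsplit]
    rw [List.countP_append, List.countP_append]
    rw [countP_not_fix_eq_zero a 0 i (by intro m h1 h2; exact hL.2.2.1 m h1 (by omega))]
    rw [countP_not_fix_eq_zero a j (L - j)
      (by intro m h1 h2; exact hR.2.2.1 m h1 (by omega))]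
    omega
  have hsum : (List.range' i (j - i)).countP (fixB a)
      + (List.range' i (j - i)).countP (fun m => !fixB a m) = j - i := by
    rw [countP_add_countP_not, List.length_range']
  set mid := (List.range' i (j - i)).countP (fixB a) with hmid
  -- the two "all correct" tests agree
  have hcond : ((L : Int) - (((badN a).map (fun m : Nat => (m : Int))).length : Int) = n)
      ↔ ((i : Int) + ((L : Int) - (j : Int)) + (mid : Int) = n) := by
    rw [List.length_map]
    constructor <;> intro h <;> omega
  by_cases hn : (i : Int) + ((L : Int) - (j : Int)) + (mid : Int) = n
  · rw [if_pos (hcond.2 hn), if_pos hn]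
  · rw [if_neg (fun h => hn (hcond.1 h)), if_neg hn]
    -- remaining: chain B = true ↔ mid = 0
    cases hb : badN a with
    | nil =>
      have hiL : i = L := by
        by_contra hne
        have hfix := hL.2.2.2 (by omega)
        have : i ∈ badN a := (mem_badN a i).2 ⟨by omega, hfix⟩
        rw [hb] at this
        simp at this
      have hmid0 : mid = 0 := by
        rw [hb] at hcnt
        simp at hcnt
        omega
      simp [chain, hmid0]
    | cons f t =>
      have hBchain : List.IsChain (· < ·) ((badN a).map (fun m : Nat => (m : Int))) := by
        rw [← badF_zero]
        exact badF_isChain a 0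
      have hpw := pairwise_badN a
      rw [hb] at hBchain hpw hcnt
      have hfmem : f < L ∧ fixB a f = false := (mem_badN a f).1 (by rw [hb]; exact List.mem_cons_self)
      -- e = last bad index
      set e := (f :: t).getLastD 0 with hedef
      have hemem : e < L ∧ fixB a e = false :=
        (mem_badN a e).1 (by rw [hb]; exact getLastD_mem f t 0)
      have hemax : ∀ m ∈ f :: t, m ≤ e := getLastD_max f t 0 hpw
      have hfe : f ≤ e := hemax f List.mem_cons_self
      -- i = f
      have hif : i = f := by
        rcases List.pairwise_cons.1 hpw with ⟨hmin, _⟩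
        by_contra hne
        rcases Nat.lt_or_ge i f with hlt | hge
        · have hfix := hL.2.2.2 (by omega)
          have : i ∈ badN a := (mem_badN a i).2 ⟨by omega, hfix⟩
          rw [hb] at this
          rcases List.mem_cons.1 this with h' | h'
          · omega
          · have := hmin i h'
            omega
        · have : f < i := by omega
          have := hL.2.2.1 f (by omega) this
          rw [hfmem.2] at this
          exact Bool.false_ne_true this
      -- j = e + 1
      have hje : j = e + 1 := by
        have hej : e < j := by
          by_contra hle
          have := hR.2.2.1 e (by omega) hemem.1
          rw [hemem.2] at this
          exact Bool.false_ne_true this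
        by_contra hne
        have hj1 : i < j := by omega
        have hfix := hR.2.2.2 hj1
        have : j - 1 ∈ badN a := (mem_badN a (j - 1)).2 ⟨by omega, hfix⟩
        rw [hb] at this
        have := hemax _ this
        omega
      -- chain characterisation
      simp only [List.map_cons]
      have hlast : (((f : Int) :: t.map (fun m : Nat => (m : Int))).getLastD 0) = (e : Int) := by
        rw [show ((f : Int) :: t.map (fun m : Nat => (m : Int))) = (f :: t).map (fun m : Nat => (m : Int)) by
          simp]
        rw [getLastD_map_cast]
      by_cases hm0 : mid = 0
      · have hlen : (1 + t.length) = j - i := by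
          simp only [List.length_cons] at hcnt
          omega
        have hch : chain ((f : Int) :: t.map (fun m : Nat => (m : Int))) = true := by
          apply getLast_chain
          · simpa using hBchain
          · rw [hlast]
            simp only [List.length_map]
            omega
        rw [if_pos hch, hm0]
        norm_num
      · have hne1 : ¬ (1 + t.length) = j - i := by
          simp only [List.length_cons] at hcnt
          omega
        have hch : ¬ chain ((f : Int) :: t.map (fun m : Nat => (m : Int))) = true := by
          intro hch
          have := chain_getLast _ _ hch
          rw [hlast] at this
          simp only [List.length_map] at this
          omega
        rw [if_neg hch, if_neg (by
          intro h0
          apply hm0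
          omega)]
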